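-- pv_equiv track=rewrite | github.com/dmitry487/python-Ege2024 | ege/ege3/9/48457/48457.py | check
-- ===== SOURCE A (Python) =====
-- def check(row):
--     povtor = []
--     nepovtor = []
--
--     for num in row:
--         if row.count(num) == 1:
--             nepovtor.append(num)
--         else:
--             povtor.append(num)
--
--
--     if (
--         (
--             (len(povtor)) == 4 and (len(nepovtor)) == 2
--         )and
--         (
--             sum(set(povtor)) > sum(nepovtor)
--         )
--     ):return True
--     return False
-- ===== SOURCE B (Python) =====
-- def check(row):
--     counts = {}
--     for num in row:
--         counts[num] = counts.get(num, 0) + 1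
--     repeated_count = 0
--     singleton_count = 0
--     repeated_sum = 0
--     singleton_sum = 0
--     for value, c in counts.items():
--         if c == 1:
--             singleton_count += 1
--             singleton_sum += value
--         else:
--             repeated_count += c
--             repeated_sum += value
--     return repeated_count == 4 and singleton_count == 2 and repeated_sum > singleton_sum
-- ===== Notes on version B (the rewrite author's own statement) =====
-- stated objective: faster
-- what changed: Replaces the O(n^2) loop that calls row.count per element (plus the two lists and set) with one dict-counting pass and one pass over the counts accumulating the four scalar statistics.
import Mathlib
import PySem

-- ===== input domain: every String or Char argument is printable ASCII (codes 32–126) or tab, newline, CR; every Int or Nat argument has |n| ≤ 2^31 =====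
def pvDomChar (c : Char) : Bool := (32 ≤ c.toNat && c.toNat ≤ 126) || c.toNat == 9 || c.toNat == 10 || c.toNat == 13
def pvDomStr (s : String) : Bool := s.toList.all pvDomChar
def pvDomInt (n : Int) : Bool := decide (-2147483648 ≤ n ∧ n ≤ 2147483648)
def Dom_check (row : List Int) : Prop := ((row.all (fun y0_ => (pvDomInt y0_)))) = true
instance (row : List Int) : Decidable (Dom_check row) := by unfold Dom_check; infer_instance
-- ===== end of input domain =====

-- B replaces A's O(n^2) per-element row.count scan by one dict-counting pass and one pass over the counts (objective: faster).

-- ===== PORT A =====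
def check (row : List Int) : Bool :=
  -- the for-loop building povtor / nepovtor, then the final condition
  let st := row.foldl
    (fun (s : List Int × List Int) num =>
      if PySem.List.count row num == 1 then (s.1, s.2 ++ [num]) else (s.1 ++ [num], s.2))
    ([], [])
  let povtor := st.1
  let nepovtor := st.2
  if (povtor.length == 4 && nepovtor.length == 2)
      && decide ((PySem.Set.ofList povtor).sum > nepovtor.sum)
  then true else false

-- ===== PORT B =====
def check_alt (row : List Int) : Bool :=
  -- counts[num] = counts.get(num, 0) + 1
  let counts := row.foldl (fun (d : PySem.Dict Int Int) x => d.insert x (d.getD x 0 + 1)) PySem.Dict.empty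
  -- for value, c in counts.items(): accumulate (repeated_count, singleton_count, repeated_sum, singleton_sum)
  let st := counts.items.foldl
    (fun (s : Int × Int × Int × Int) vc =>
      if vc.2 == 1 then (s.1, s.2.1 + 1, s.2.2.1, s.2.2.2 + vc.1)
      else (s.1 + vc.2, s.2.1, s.2.2.1 + vc.1, s.2.2.2))
    (0, 0, 0, 0)
  st.1 == 4 && st.2.1 == 2 && decide (st.2.2.1 > st.2.2.2)

-- ===== PRECONDITION & SPEC =====
def Spec_check (row : List Int) (out : Bool) : Prop := out = check_alt row
instance (row : List Int) (out : Bool) : Decidable (Spec_check row out) := by unfold Spec_check; infer_instance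

-- ===== CLAIM (what is proved, stated in full; the proofs are below) =====
def Claim_equal_check : Prop := ∀ (row : List Int), Dom_check row → Spec_check row (check row)

-- ===== LEMMAS AND PROOFS =====

-- A's loop is an append of the two filters.
theorem foldA_eq (row l : List Int) (a b : List Int) :
    l.foldl (fun (s : List Int × List Int) num =>
      if PySem.List.count row num == 1 then (s.1, s.2 ++ [num]) else (s.1 ++ [num], s.2)) (a, b)
    = (a ++ l.filter (fun x => !(PySem.List.count row x == 1)),
       b ++ l.filter (fun x => PySem.List.count row x == 1)) := by
  induction l generalizing a b with
  | nil => simp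
  | cons x xs ih =>
    by_cases h : PySem.List.count row x == 1 <;>
      simp only [List.foldl_cons, List.filter_cons, h, Bool.not_true, Bool.not_false,
        ite_true, ite_false] <;>
      rw [ih] <;> simp

-- B's loop computes four ite-sums over the item list.
theorem foldB_eq (l : List (Int × Int)) (a b c d : Int) :
    l.foldl
      (fun (s : Int × Int × Int × Int) vc =>
        if vc.2 == 1 then (s.1, s.2.1 + 1, s.2.2.1, s.2.2.2 + vc.1)
        else (s.1 + vc.2, s.2.1, s.2.2.1 + vc.1, s.2.2.2))
      (a, b, c, d)
    = (a + (l.map (fun vc => if vc.2 == 1 then 0 else vc.2)).sum,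
       b + (l.map (fun vc => if vc.2 == 1 then (1:Int) else 0)).sum,
       c + (l.map (fun vc => if vc.2 == 1 then 0 else vc.1)).sum,
       d + (l.map (fun vc => if vc.2 == 1 then vc.1 else 0)).sum) := by
  induction l generalizing a b c d with
  | nil => simp
  | cons x xs ih =>
    simp only [List.foldl_cons, List.map_cons, List.sum_cons]
    by_cases h : (x.2 == 1) = true
    · rw [if_pos h, if_pos h, if_pos h, if_pos h, if_pos h, ih]
      simp only [Prod.mk.injEq]; and_intros <;> ring
    · rw [if_neg h, if_neg h, if_neg h, if_neg h, if_neg h, ih]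
      simp only [Prod.mk.injEq]; and_intros <;> ring

-- sum over a filter as a sum of an ite-map
theorem sum_map_filter (l : List Int) (p : Int → Bool) (f : Int → Int) :
    ((l.filter p).map f).sum = (l.map (fun x => if p x then f x else 0)).sum := by
  induction l with
  | nil => rfl
  | cons x xs ih => by_cases h : p x <;> simp [h, ih]

-- multiset identity: a sum of a map over l is a count-weighted Finset sum
theorem sum_map_count (l : List Int) (g : Int → Int) :
    (l.map g).sum = ∑ v ∈ l.toFinset, (l.count v : Int) * g v := by
  induction l with
  | nil => simp
  | cons x xs ih =>
    rw [List.toFinset_cons]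
    by_cases hx : x ∈ xs.toFinset
    · rw [Finset.insert_eq_self.mpr hx]
      simp only [List.map_cons, List.sum_cons, ih]
      rw [← Finset.sum_erase_add _ _ hx, ← Finset.sum_erase_add _ _ hx]
      have : ∀ v ∈ xs.toFinset.erase x,
          ((x :: xs).count v : Int) * g v = (xs.count v : Int) * g v := by
        intro v hv
        rcases Finset.mem_erase.mp hv with ⟨hne, _⟩
        rw [List.count_cons_of_ne hne.symm]
      rw [Finset.sum_congr rfl this]
      rw [List.count_cons_self]
      push_cast
      ring
    · rw [Finset.sum_insert hx]
      simp only [List.map_cons, List.sum_cons, ih]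
      have h1 : xs.count x = 0 := by
        simpa [List.count_eq_zero] using fun h => hx (List.mem_toFinset.mpr h)
      have : ∀ v ∈ xs.toFinset, ((x :: xs).count v : Int) * g v = (xs.count v : Int) * g v := by
        intro v hv
        have hvx : v ≠ x := by rintro rfl; exact hx hv
        rw [List.count_cons_of_ne hvx.symm]
      rw [Finset.sum_congr rfl this, List.count_cons_self, h1]
      push_cast; ring

-- a nodup list's map-sum is its toFinset sum
theorem sum_map_nodup (l : List Int) (h : l.Nodup) (g : Int → Int) :
    (l.map g).sum = ∑ v ∈ l.toFinset, g v := by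
  induction l with
  | nil => simp
  | cons x xs ih =>
    rcases List.nodup_cons.mp h with ⟨hx, hxs⟩
    rw [List.toFinset_cons, Finset.sum_insert (by simpa using hx)]
    simp [ih hxs]

theorem length_eq_sum_ones (l : List Int) : ((l.map (fun _ => (1:Int))).sum) = (l.length : Int) := by
  induction l with
  | nil => rfl
  | cons x xs ih => simp [ih]; ring

theorem toFinset_ofList (l : List Int) : (PySem.Set.ofList l).toFinset = l.toFinset := by
  apply Finset.ext
  intro v
  simp [List.mem_toFinset, PySem.Set.mem_ofList]

theorem sum_map_ofList (l : List Int) (g : Int → Int) :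
    ((PySem.Set.ofList l).map g).sum = ∑ v ∈ l.toFinset, g v := by
  rw [sum_map_nodup _ (PySem.Set.nodup_ofList _), toFinset_ofList]

theorem check_eq_check_alt (row : List Int) : check row = check_alt row := by
  unfold check check_alt
  dsimp only
  rw [foldA_eq row row [] []]
  rw [PySem.Dict.foldl_insert_getD_add_one_eq_counter, PySem.Dict.items_counter]
  rw [foldB_eq]
  simp only [List.nil_append, List.map_map, Function.comp_def, zero_add, beq_iff_eq]
  -- the A-side loop predicate
  set p : Int → Bool := fun x => PySem.List.count row x == 1 with hp
  -- the four B-side sums as Finset sums over row.toFinset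
  have hB : ∀ f g : Int → Int,
      ((PySem.Set.ofList row).map (fun k =>
        if ((List.count k row : Int) = 1) then f k else g k)).sum
      = ∑ v ∈ row.toFinset, (if p v then f v else g v) := by
    intro f g
    rw [sum_map_ofList]
    apply Finset.sum_congr rfl
    intro v _
    by_cases h : List.count v row = 1
    · simp [hp, PySem.List.count_eq, h]
    · have h' : ¬ ((List.count v row : Int) = 1) := by exact_mod_cast h
      simp [hp, PySem.List.count_eq, h, h']
  -- A-side filter lengths and sums as the same kind of Finset sums
  have hmap : ∀ (q : Int → Bool) (f : Int → Int),
      ((row.filter q).map f).sum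
      = ∑ v ∈ row.toFinset, (if q v then (List.count v row : Int) * f v else 0) := by
    intro q f
    rw [sum_map_filter, sum_map_count]
    apply Finset.sum_congr rfl
    intro v _
    by_cases h : q v <;> simp [h]
  have hlen : ∀ q : Int → Bool, (((row.filter q).length : Int))
      = ∑ v ∈ row.toFinset, (if q v then (List.count v row : Int) else 0) := by
    intro q
    rw [← length_eq_sum_ones (row.filter q), hmap]
    apply Finset.sum_congr rfl
    intro v _
    by_cases h : q v <;> simp [h]
  -- when p v holds, the count is 1
  have hpc : ∀ v, p v = true → (List.count v row : Int) = 1 := by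
    intro v hv
    have : PySem.List.count row v = 1 := by simpa [hp] using hv
    rw [PySem.List.count_eq] at this
    exact_mod_cast this
  -- the four agreement equations
  have A1 : (((row.filter (fun x => !(p x))).length : Int))
      = ((PySem.Set.ofList row).map (fun k =>
          if ((List.count k row : Int) = 1) then 0 else (List.count k row : Int))).sum := by
    rw [hlen, hB (fun _ => 0) (fun k => (List.count k row : Int))]
    apply Finset.sum_congr rfl
    intro v _
    by_cases h : p v <;> simp [h]
  have A2 : (((row.filter p).length : Int))
      = ((PySem.Set.ofList row).map (fun k =>
          if ((List.count k row : Int) = 1) then 1 else 0)).sum := by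
    rw [hlen, hB (fun _ => 1) (fun _ => 0)]
    apply Finset.sum_congr rfl
    intro v _
    by_cases h : p v <;> simp [h, hpc v]
  have A3 : (PySem.Set.ofList (row.filter (fun x => !(p x)))).sum
      = ((PySem.Set.ofList row).map (fun k =>
          if ((List.count k row : Int) = 1) then 0 else k)).sum := by
    have h1 : (PySem.Set.ofList (row.filter (fun x => !(p x)))).sum
        = ((PySem.Set.ofList (row.filter (fun x => !(p x)))).map id).sum := by simp
    rw [h1, sum_map_ofList, hB (fun _ => 0) (fun k => k), List.toFinset_filter, Finset.sum_filter]
    apply Finset.sum_congr rfl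
    intro v _
    by_cases h : p v <;> simp [h]
  have A4 : ((row.filter p).sum)
      = ((PySem.Set.ofList row).map (fun k =>
          if ((List.count k row : Int) = 1) then k else 0)).sum := by
    have h1 : (row.filter p).sum = ((row.filter p).map id).sum := by simp
    rw [h1, hmap, hB (fun k => k) (fun _ => 0)]
    apply Finset.sum_congr rfl
    intro v _
    by_cases h : p v <;> simp [h, hpc v]
  -- assemble the boolean results
  split_ifs with h
  · simp only [Bool.and_eq_true, beq_iff_eq, decide_eq_true_eq] at h
    obtain ⟨⟨h1, h2⟩, h3⟩ := h
    symm
    simp only [Bool.and_eq_true, beq_iff_eq, decide_eq_true_eq]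
    refine ⟨⟨?_, ?_⟩, ?_⟩
    · rw [← A1, h1]; norm_num
    · rw [← A2, h2]; norm_num
    · rw [← A3, ← A4]; exact h3
  · symm
    rw [Bool.eq_false_iff]
    intro hc
    simp only [Bool.and_eq_true, beq_iff_eq, decide_eq_true_eq] at hc
    obtain ⟨⟨g1, g2⟩, g3⟩ := hc
    apply h
    simp only [Bool.and_eq_true, beq_iff_eq, decide_eq_true_eq]
    refine ⟨⟨?_, ?_⟩, ?_⟩
    · exact_mod_cast A1.trans g1
    · exact_mod_cast A2.trans g2
    · rw [A3, A4]; exact g3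

-- ===== VERDICT (by name: the statement is the Claim_ definition above) =====
theorem check_spec : Claim_equal_check := by
  intro row _
  unfold Spec_check
  exact check_eq_check_alt row
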